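-- pv_equiv track=rewrite | github.com/luchrv/python_kaprekar | kaprekar_.py | minuendo
-- ===== SOURCE A (Python) =====
-- def minuendo(numero):
--     size = len(numero)
--     arr = [
--         numero[0],
--         numero[1],
--         numero[2],
--         numero[3] if (size == 4) else "0",
--     ]
--     arr.sort()
--     arr.reverse()
--     return int("".join(str(e) for e in arr))
-- ===== SOURCE B (Python) =====
-- def minuendo(numero):
--     size = len(numero)
--     chars = [
--         numero[0],
--         numero[1],
--         numero[2],
--         numero[3] if (size == 4) else "0",
--     ]
--     count = [0] * 10
--     for c in chars:
--         if c in "0123456789":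
--             count[int(c)] += 1
--     result = 0
--     for d in range(9, -1, -1):
--         for _ in range(count[d]):
--             result = result * 10 + d
--     return result
-- ===== Notes on version B (the rewrite author's own statement) =====
-- stated objective: alternative
-- what changed: Replaces the comparison sort (sort+reverse), string join and int() parse with a counting sort over ten digit buckets that accumulates the result arithmetically (result = result*10 + d), never building or parsing a string.
import Mathlib
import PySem

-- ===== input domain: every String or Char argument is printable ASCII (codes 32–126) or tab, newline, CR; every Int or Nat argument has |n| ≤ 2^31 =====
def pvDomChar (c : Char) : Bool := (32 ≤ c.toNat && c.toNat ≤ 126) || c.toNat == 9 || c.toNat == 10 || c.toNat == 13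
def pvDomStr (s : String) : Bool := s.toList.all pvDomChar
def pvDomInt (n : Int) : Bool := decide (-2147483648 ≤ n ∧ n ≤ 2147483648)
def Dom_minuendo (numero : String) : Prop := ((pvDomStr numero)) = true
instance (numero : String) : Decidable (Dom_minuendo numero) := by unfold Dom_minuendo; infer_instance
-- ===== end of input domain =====

-- B replaces A's comparison sort + string join + int() parse by a counting sort over
-- digit buckets that accumulates the result arithmetically (alternative decomposition).


-- ===== PORT A =====
def minuendo (numero : String) : Int :=
  let size : Int := PySem.Str.len numero
  match PySem.Str.pyGet? numero 0, PySem.Str.pyGet? numero 1, PySem.Str.pyGet? numero 2,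
        (if size = 4 then PySem.Str.pyGet? numero 3 else some '0') with
  | some a, some b, some c, some d =>
      let arr := [a, b, c, d]
      let arr := PySem.List.sorted arr (fun x => x) false
      let arr := arr.reverse
      (PySem.Int.ofChars? arr).getD 0
  | _, _, _, _ => 0

-- ===== PORT B =====
def minuendo_alt (numero : String) : Int :=
  let size : Int := PySem.Str.len numero
  match PySem.Str.pyGet? numero 0 with
  | none => 0
  | some a =>
  match PySem.Str.pyGet? numero 1 with
  | none => 0
  | some b =>
  match PySem.Str.pyGet? numero 2 with
  | none => 0
  | some c =>
  match (if size = 4 then PySem.Str.pyGet? numero 3 else some '0') with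
  | none => 0
  | some d =>
      let chars := [a, b, c, d]
      let count : List Int := chars.foldl
        (fun cnt ch =>
          if "0123456789".toList.contains ch then
            let i : Int := (PySem.Int.ofChars? [ch]).getD 0
            PySem.List.pySetD cnt i (PySem.List.pyGetD cnt i 0 + 1)
          else cnt)
        (List.replicate 10 (0 : Int))
      let result : Int := (PySem.List.pyRange 9 (-1) (-1)).foldl
        (fun r d =>
          (PySem.List.pyRange 0 (PySem.List.pyGetD count d 0) 1).foldl
            (fun r _ => r * 10 + d) r)
        0
      result

-- ===== PRECONDITION & SPEC =====
-- Pre_ admits exactly the strings (inside Dom) on which A returns normally: length ≥ 3 and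
-- the four selected characters (the first three, plus the fourth when len = 4, else '0')
-- are all digits or whitespace with at least one digit; on everything else A raises
-- (IndexError for len < 3, else ValueError at int()).
def okChar (c : Char) : Bool :=
  c.isDigit || c == ' ' || c == '\t' || c == '\n' || c == '\r'

def preCheck (l : List Char) : Bool :=
  match l with
  | c0 :: c1 :: c2 :: rest =>
      okChar c0 && okChar c1 && okChar c2 &&
      (if rest.length = 1 then
        okChar (rest.headD '0')
          && (c0.isDigit || c1.isDigit || c2.isDigit || (rest.headD '0').isDigit)
       else true)
  | _ => false

def Pre_minuendo (numero : String) : Prop := preCheck numero.toList = true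
instance (numero : String) : Decidable (Pre_minuendo numero) := by unfold Pre_minuendo; infer_instance

def pvWitness_minuendo : String := "3087"

def Spec_minuendo (numero : String) (out : Int) : Prop := out = minuendo_alt numero
instance (numero : String) (out : Int) : Decidable (Spec_minuendo numero out) := by unfold Spec_minuendo; infer_instance

-- ===== CLAIM (what is proved, stated in full; the proofs are below) =====
def Claim_equal_minuendo : Prop := ∀ (numero : String), Dom_minuendo numero → Pre_minuendo numero → Spec_minuendo numero (minuendo numero)

-- ===== LEMMAS AND PROOFS =====

-- each port as a function of the four selected characters
def coreA (a b c d : Char) : Int :=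
  (PySem.Int.ofChars? ((PySem.List.sorted [a, b, c, d] (fun x => x) false).reverse)).getD 0

def stepFn : List Int → Char → List Int := fun cnt ch =>
  if "0123456789".toList.contains ch then
    let i : Int := (PySem.Int.ofChars? [ch]).getD 0
    PySem.List.pySetD cnt i (PySem.List.pyGetD cnt i 0 + 1)
  else cnt

def outFn (count : List Int) : Int :=
  (PySem.List.pyRange 9 (-1) (-1)).foldl
    (fun r d =>
      (PySem.List.pyRange 0 (PySem.List.pyGetD count d 0) 1).foldl
        (fun r _ => r * 10 + d) r)
    0

def coreB (a b c d : Char) : Int := outFn ([a, b, c, d].foldl stepFn (List.replicate 10 (0 : Int)))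

-- "increment the cell at python index i (no-op when out of range)"
def updI (l : List Int) (i : Int) : List Int :=
  PySem.List.pySetD l i (PySem.List.pyGetD l i 0 + 1)

theorem pyIdx?_lt {n : Nat} {i : Int} {k : Nat} (h : PySem.List.pyIdx? n i = some k) : k < n := by
  unfold PySem.List.pyIdx? at h
  split_ifs at h with h1 h2 h3 <;> simp_all <;> omega

def updN (l : List Int) : Option Nat → List Int
  | none => l
  | some k => l.set k (l.getD k 0 + 1)

theorem updI_eq_updN (l : List Int) (i : Int) :
    updI l i = updN l (PySem.List.pyIdx? l.length i) := by
  unfold updI PySem.List.pySetD PySem.List.pySet? PySem.List.pyGetD PySem.List.pyGet?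
  cases h : PySem.List.pyIdx? l.length i with
  | none => simp [updN]
  | some k =>
      have hk : k < l.length := pyIdx?_lt h
      simp [updN, List.getD_eq_getElem?_getD]

theorem updN_length (l : List Int) (k? : Option Nat) : (updN l k?).length = l.length := by
  cases k? <;> simp [updN]

theorem updN_comm (l : List Int) (k1? k2? : Option Nat)
    (h1 : ∀ k, k1? = some k → k < l.length) (h2 : ∀ k, k2? = some k → k < l.length) :
    updN (updN l k1?) k2? = updN (updN l k2?) k1? := by
  cases k1? with
  | none => rfl
  | some k1 =>
      cases k2? with
      | none => rfl
      | some k2 =>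
          have hk1 : k1 < l.length := h1 k1 rfl
          have hk2 : k2 < l.length := h2 k2 rfl
          simp only [updN]
          by_cases hkk : k1 = k2
          · subst hkk
            simp [hk1, List.set_set]
          · have h21 : k2 ≠ k1 := fun h => hkk h.symm
            simp only [List.getD_eq_getElem?_getD]
            rw [List.getElem?_set_ne hkk, List.getElem?_set_ne h21,
                List.set_comm _ _ hkk]

theorem updI_comm (l : List Int) (i j : Int) : updI (updI l i) j = updI (updI l j) i := by
  have h : ∀ a b : Int, updI (updI l a) b
      = updN (updN l (PySem.List.pyIdx? l.length a)) (PySem.List.pyIdx? l.length b) := by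
    intro a b
    rw [updI_eq_updN l a, updI_eq_updN (updN l _) b, updN_length]
  rw [h i j, h j i]
  apply updN_comm
  · intro k hk; exact pyIdx?_lt hk
  · intro k hk; exact pyIdx?_lt hk

theorem stepFn_comm : ∀ (cnt : List Int) (x y : Char),
    stepFn (stepFn cnt x) y = stepFn (stepFn cnt y) x := by
  intro cnt x y
  by_cases hx : "0123456789".toList.contains x <;>
    by_cases hy : "0123456789".toList.contains y <;>
      simp only [stepFn, hx, hy, if_pos, Bool.false_eq_true, if_false]
  exact updI_comm cnt _ _

def alphaChar (i : Fin 14) : Char :=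
  if i.val < 10 then Char.ofNat (48 + i.val)
  else if i.val = 10 then ' '
  else if i.val = 11 then '\t'
  else if i.val = 12 then '\n'
  else '\r'

theorem alpha_char (c : Char) (h : okChar c = true) : ∃ i : Fin 14, c = alphaChar i := by
  by_cases hd : c.isDigit = true
  · have h' : 48 ≤ c.toNat ∧ c.toNat ≤ 57 := by
      simp [Char.isDigit] at hd
      exact hd
    refine ⟨⟨c.toNat - 48, by omega⟩, ?_⟩
    have e : 48 + (c.toNat - 48) = c.toNat := by omega
    simp only [alphaChar, if_pos (show c.toNat - 48 < 10 by omega), e, Char.ofNat_toNat]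
  · have h5 : c = ' ' ∨ c = '\t' ∨ c = '\n' ∨ c = '\r' := by
      simp [okChar, hd] at h
      tauto
    rcases h5 with rfl | rfl | rfl | rfl
    · exact ⟨⟨10, by omega⟩, by decide⟩
    · exact ⟨⟨11, by omega⟩, by decide⟩
    · exact ⟨⟨12, by omega⟩, by decide⟩
    · exact ⟨⟨13, by omega⟩, by decide⟩

set_option maxHeartbeats 12000000 in
theorem core_eq_sorted : ∀ w x y z : Fin 14,
    alphaChar x ≤ alphaChar w → alphaChar y ≤ alphaChar x → alphaChar z ≤ alphaChar y →
    ([alphaChar w, alphaChar x, alphaChar y, alphaChar z].any Char.isDigit) = true →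
    coreA (alphaChar w) (alphaChar x) (alphaChar y) (alphaChar z)
  = coreB (alphaChar w) (alphaChar x) (alphaChar y) (alphaChar z) := by
  decide

theorem len4_shape (l : List Char) (h : l.length = 4) : ∃ w x y z, l = [w, x, y, z] := by
  match l, h with
  | [w, x, y, z], _ => exact ⟨w, x, y, z, rfl⟩

theorem core_eq_of_ok (a b c d : Char)
    (ha : okChar a = true) (hb : okChar b = true) (hc : okChar c = true) (hd : okChar d = true)
    (hdig : ([a, b, c, d].any Char.isDigit) = true) :
    coreA a b c d = coreB a b c d := by
  obtain ⟨w, x, y, z, hys⟩ :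
      ∃ w x y z, (PySem.List.sorted [a, b, c, d] (fun x => x) false).reverse = [w, x, y, z] := by
    apply len4_shape
    rw [List.length_reverse, (PySem.List.sorted_perm [a, b, c, d] (fun x => x) false).length_eq]
    rfl
  have hperm : List.Perm [w, x, y, z] [a, b, c, d] := by
    rw [← hys]
    exact (List.reverse_perm _).trans (PySem.List.sorted_perm _ _ _)
  have hA : coreA a b c d = coreA w x y z := by
    unfold coreA
    rw [PySem.List.sorted_eq_sorted_of_perm [w, x, y, z] [a, b, c, d] (fun x => x)
          (fun _ _ h => h) hperm]
  have hB : coreB a b c d = coreB w x y z := by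
    unfold coreB outFn
    rw [@List.Perm.foldl_eq _ _ stepFn _ _ ⟨stepFn_comm⟩ hperm (List.replicate 10 (0 : Int))]
  have hdesc : List.Pairwise (fun u v : Char => v ≤ u) [w, x, y, z] := by
    rw [← hys, List.pairwise_reverse]
    exact PySem.List.sorted_pairwise [a, b, c, d] (fun x => x)
  have hmem : ∀ e ∈ ([w, x, y, z] : List Char), okChar e = true := by
    intro e he
    have : e ∈ ([a, b, c, d] : List Char) := hperm.mem_iff.mp he
    simp at this
    rcases this with rfl | rfl | rfl | rfl <;> assumption
  have hany : ([w, x, y, z] : List Char).any Char.isDigit = true :=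
    (hperm.any_eq).trans hdig
  obtain ⟨fw, rfl⟩ := alpha_char w (hmem w (by simp))
  obtain ⟨fx, rfl⟩ := alpha_char x (hmem x (by simp))
  obtain ⟨fy, rfl⟩ := alpha_char y (hmem y (by simp))
  obtain ⟨fz, rfl⟩ := alpha_char z (hmem z (by simp))
  simp only [List.pairwise_cons, List.mem_cons] at hdesc
  rw [hA, hB]
  apply core_eq_sorted
  · exact hdesc.1 _ (Or.inl rfl)
  · exact hdesc.2.1 _ (Or.inl rfl)
  · exact hdesc.2.2.1 _ (Or.inl rfl)
  · exact hany

theorem factor_ports (numero : String) (c0 c1 c2 : Char) (rest : List Char)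
    (hl : numero.toList = c0 :: c1 :: c2 :: rest) :
    minuendo numero = coreA c0 c1 c2 (if rest.length = 1 then rest.headD '0' else '0')
  ∧ minuendo_alt numero = coreB c0 c1 c2 (if rest.length = 1 then rest.headD '0' else '0') := by
  have hlen : PySem.Str.len numero = (3 : Int) + rest.length := by
    simp [PySem.Str.len_eq, hl]
    omega
  have hg : ∀ i : Nat, PySem.Str.pyGet? numero (i : Int) = numero.toList[i]? := by
    intro i; simp
  unfold minuendo minuendo_alt
  rw [show ((0 : Int)) = ((0 : Nat) : Int) from rfl, hg 0,
      show ((1 : Int)) = ((1 : Nat) : Int) from rfl, hg 1,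
      show ((2 : Int)) = ((2 : Nat) : Int) from rfl, hg 2,
      show ((3 : Int)) = ((3 : Nat) : Int) from rfl, hg 3, hl, hlen]
  by_cases h1 : rest.length = 1
  · rcases rest with _ | ⟨c3, _ | ⟨c4, r⟩⟩ <;> simp at h1
    simp [coreA, coreB, stepFn, outFn]
  · have hne : ((3 : Int) + (rest.length : Int)) ≠ 4 := by
      intro h; apply h1; omega
    simp [hne, h1, coreA, coreB, stepFn, outFn]

-- ===== VERDICT (by name: the statement is the Claim_ definition above) =====
theorem minuendo_spec : Claim_equal_minuendo := by
  intro numero _ hpre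
  unfold Spec_minuendo
  unfold Pre_minuendo preCheck at hpre
  rcases hl : numero.toList with _ | ⟨c0, _ | ⟨c1, _ | ⟨c2, rest⟩⟩⟩ <;>
    rw [hl] at hpre <;> simp only [Bool.and_eq_true] at hpre
  · cases hpre
  · cases hpre
  · cases hpre
  obtain ⟨⟨⟨h0, h1⟩, h2⟩, h3⟩ := hpre
  obtain ⟨fa, fb⟩ := factor_ports numero c0 c1 c2 rest hl
  rw [fa, fb]
  by_cases hr : rest.length = 1
  · rcases rest with _ | ⟨c3, _ | _⟩ <;> simp at hr
    simp only [List.length_cons, List.length_nil] at h3 ⊢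
    rw [if_pos trivial] at h3 ⊢
    simp only [List.headD_cons, Bool.and_eq_true] at h3 ⊢
    refine core_eq_of_ok c0 c1 c2 c3 h0 h1 h2 h3.1 ?_
    simp only [List.any_cons, List.any_nil, Bool.or_false]
    simpa [Bool.or_assoc] using h3.2
  · rw [if_neg hr]
    refine core_eq_of_ok c0 c1 c2 '0' h0 h1 h2 (by decide) ?_
    have h0' : ('0' : Char).isDigit = true := by decide
    simp [List.any_cons, h0']
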